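-- pv_equiv track=rewrite | github.com/Biomolecular-Design-Nexus/alphafold3_mcp | src/tools/af3_prepare_variants.py | _create_variant_msa
-- ===== SOURCE A (Python) =====
-- def _create_variant_msa(wt_msa: str, variant_name: str, variant_sequence: str) -> str:
--     """Create a variant MSA by replacing the query sequence."""
--     lines = wt_msa.split("\n")
--     result_lines = []
--     first_entry = True
--     skip_sequence = False
--
--     for line in lines:
--         if line.startswith(">"):
--             if first_entry:
--                 result_lines.append(f">{variant_name}")
--                 skip_sequence = True
--                 first_entry = False
--             else:
--                 result_lines.append(line)
--                 skip_sequence = False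
--         else:
--             if skip_sequence:
--                 result_lines.append(variant_sequence)
--                 skip_sequence = False
--             else:
--                 result_lines.append(line)
--
--     return "\n".join(result_lines)
-- ===== SOURCE B (Python) =====
-- def _create_variant_msa(wt_msa: str, variant_name: str, variant_sequence: str) -> str:
--     """Create a variant MSA by replacing the query sequence."""
--     lines = wt_msa.split("\n")
--     i = next((k for k, line in enumerate(lines) if line.startswith(">")), None)
--     if i is not None:
--         lines[i] = f">{variant_name}"
--         if i + 1 < len(lines) and not lines[i + 1].startswith(">"):
--             lines[i + 1] = variant_sequence
--     return "\n".join(lines)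
-- ===== Notes on version B (the rewrite author's own statement) =====
-- stated objective: simpler
-- what changed: Replaces the per-line state machine with two boolean flags by a direct search for the first '>' header line, followed by two in-place assignments (the header line and, when present and not itself a header, the line right after it).
import Mathlib
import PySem

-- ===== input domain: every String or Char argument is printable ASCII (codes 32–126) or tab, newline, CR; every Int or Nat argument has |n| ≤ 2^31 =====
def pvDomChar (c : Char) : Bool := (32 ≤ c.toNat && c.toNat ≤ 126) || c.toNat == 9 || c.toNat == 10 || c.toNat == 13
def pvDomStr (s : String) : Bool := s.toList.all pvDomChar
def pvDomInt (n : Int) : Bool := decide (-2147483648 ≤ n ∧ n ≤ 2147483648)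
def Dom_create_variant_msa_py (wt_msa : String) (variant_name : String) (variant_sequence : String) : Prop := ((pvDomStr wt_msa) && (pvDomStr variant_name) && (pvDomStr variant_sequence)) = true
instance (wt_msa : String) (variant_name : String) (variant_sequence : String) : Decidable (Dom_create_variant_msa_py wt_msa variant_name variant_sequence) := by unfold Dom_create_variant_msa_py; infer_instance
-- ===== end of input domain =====

-- B replaces A's per-line two-flag state machine by a direct search for the first header
-- line and two in-place updates (objective: simpler).


-- ===== PORT A =====
-- the for-loop over lines with state (first_entry, skip_sequence), result built line by line
def pvAGo (vn vs : String) (fe sk : Bool) : List String → List String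
  | [] => []
  | l :: ls =>
    if PySem.Str.startswith l ">" then
      if fe then (">" ++ vn) :: pvAGo vn vs false true ls
      else l :: pvAGo vn vs fe false ls
    else
      if sk then vs :: pvAGo vn vs fe false ls
      else l :: pvAGo vn vs fe sk ls

def create_variant_msa_py (wt_msa : String) (variant_name : String) (variant_sequence : String) : String :=
  PySem.Str.join "\n" (pvAGo variant_name variant_sequence true false ((PySem.Str.split? wt_msa "\n").getD []))

-- ===== PORT B =====
-- find the first header line, patch it and (when non-header) the line after it
def pvBPatch (vn vs : String) (lines : List String) : List String :=
  match lines.findIdx? (fun l => PySem.Str.startswith l ">") with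
  | none => lines
  | some i =>
    let lines1 := lines.set i (">" ++ vn)
    match lines1[i+1]? with
    | some nxt => if PySem.Str.startswith nxt ">" then lines1 else lines1.set (i+1) vs
    | none => lines1

def create_variant_msa_py_alt (wt_msa : String) (variant_name : String) (variant_sequence : String) : String :=
  PySem.Str.join "\n" (pvBPatch variant_name variant_sequence ((PySem.Str.split? wt_msa "\n").getD []))

-- ===== PRECONDITION & SPEC =====
def Spec_create_variant_msa_py (wt_msa : String) (variant_name : String) (variant_sequence : String) (out : String) : Prop := out = create_variant_msa_py_alt wt_msa variant_name variant_sequence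
instance (wt_msa : String) (variant_name : String) (variant_sequence : String) (out : String) : Decidable (Spec_create_variant_msa_py wt_msa variant_name variant_sequence out) := by unfold Spec_create_variant_msa_py; infer_instance

-- ===== CLAIM (what is proved, stated in full; the proofs are below) =====
def Claim_equal_create_variant_msa_py : Prop := ∀ (wt_msa : String) (variant_name : String) (variant_sequence : String), Dom_create_variant_msa_py wt_msa variant_name variant_sequence → Spec_create_variant_msa_py wt_msa variant_name variant_sequence (create_variant_msa_py wt_msa variant_name variant_sequence)

-- ===== LEMMAS AND PROOFS =====

-- with both flags off, the loop copies the rest unchanged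
theorem pvAGo_idle (vn vs : String) (ls : List String) :
    pvAGo vn vs false false ls = ls := by
  induction ls with
  | nil => rfl
  | cons l ls ih => simp [pvAGo, ih]

-- the state machine run from the initial state equals B's search-and-patch
theorem pvAGo_eq_patch (vn vs : String) (ls : List String) :
    pvAGo vn vs true false ls = pvBPatch vn vs ls := by
  induction ls with
  | nil => rfl
  | cons l ls ih =>
    by_cases h : PySem.Chars.startswith l.toList ['>'] = true
    · cases ls with
      | nil => simp [pvAGo, pvBPatch, h, List.findIdx?_cons]
      | cons m ms =>
        by_cases hm : PySem.Chars.startswith m.toList ['>'] = true <;>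
          simp [pvAGo, pvBPatch, h, hm, List.findIdx?_cons, pvAGo_idle]
    · rw [Bool.not_eq_true] at h
      have lhs : pvAGo vn vs true false (l :: ls) = l :: pvBPatch vn vs ls := by
        simp [pvAGo, h, ih]
      rw [lhs]
      unfold pvBPatch
      rw [List.findIdx?_cons]
      simp only [PySem.Str.startswith_eq]
      rw [if_neg (by simp [h])]
      cases hfi : List.findIdx? (fun l => PySem.Chars.startswith l.toList ">".toList) ls with
      | none => rfl
      | some i =>
        simp only [Option.map_some, List.set_cons_succ, List.getElem?_cons_succ]
        cases hn : (ls.set i (">" ++ vn))[i + 1]? with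
        | none => rfl
        | some nxt =>
          simp only [show (">".toList : List Char) = ['>'] from rfl]
          split <;> rfl

-- ===== VERDICT (by name: the statement is the Claim_ definition above) =====
theorem create_variant_msa_py_spec : Claim_equal_create_variant_msa_py := by
  intro wt vn vs _
  unfold Spec_create_variant_msa_py create_variant_msa_py create_variant_msa_py_alt
  rw [pvAGo_eq_patch]
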